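-- pv_equiv track=rewrite | github.com/wany16/Laps-ns3 | PythonCode/plottingBase.py | find_the_first_element_smaller_than_given_value_in_list
-- ===== SOURCE A (Python) =====
-- def find_the_first_element_smaller_than_given_value_in_list(L, V):
--     res = []
--     for v in V:
--         dif = 10**6
--         tmpIdx = -1
--         for idx in range(0, len(L)):
--             if abs(v-L[idx]) < dif:
--                 dif = abs(v-L[idx])
--                 tmpIdx = idx
--         res.append(tmpIdx)
--     return res
-- ===== SOURCE B (Python) =====
-- def find_the_first_element_smaller_than_given_value_in_list(L, V):
--     # first occurrence index of each value
--     first = {}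
--     for i, x in enumerate(L):
--         if x not in first:
--             first[x] = i
--     vals = sorted(first)
--     n = len(vals)
--     res = []
--     for v in V:
--         if n == 0:
--             res.append(-1)
--         else:
--             # leftmost position with vals[pos] >= v
--             lo, hi = 0, n
--             while lo < hi:
--                 mid = (lo + hi) // 2
--                 if vals[mid] < v:
--                     lo = mid + 1
--                 else:
--                     hi = mid
--             best = None
--             for j in (lo - 1, lo):
--                 if 0 <= j < n:
--                     d = v - vals[j] if v >= vals[j] else vals[j] - v
--                     c = (d, first[vals[j]])
--                     if best is None or c < best:
--                         best = c
--             res.append(best[1])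
--     return res
-- ===== Notes on version B (the rewrite author's own statement) =====
-- stated objective: faster
-- what changed: Replaces A's linear scan of L for every query with a first-occurrence dict plus a sorted distinct-value list built once, then a binary search per query and a (dif, index)-lexicographic comparison of the two neighbouring values.
-- intended difference: On a nonempty L with some query v at distance >= 10**6 from every element of L, A's too-small 'infinity' sentinel makes it return -1 at that position, while B returns the index of the (first) nearest element, the intended value. — e.g. on find_the_first_element_smaller_than_given_value_in_list([0], [2000000]): A returns [-1], B returns [0]
import Mathlib
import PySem

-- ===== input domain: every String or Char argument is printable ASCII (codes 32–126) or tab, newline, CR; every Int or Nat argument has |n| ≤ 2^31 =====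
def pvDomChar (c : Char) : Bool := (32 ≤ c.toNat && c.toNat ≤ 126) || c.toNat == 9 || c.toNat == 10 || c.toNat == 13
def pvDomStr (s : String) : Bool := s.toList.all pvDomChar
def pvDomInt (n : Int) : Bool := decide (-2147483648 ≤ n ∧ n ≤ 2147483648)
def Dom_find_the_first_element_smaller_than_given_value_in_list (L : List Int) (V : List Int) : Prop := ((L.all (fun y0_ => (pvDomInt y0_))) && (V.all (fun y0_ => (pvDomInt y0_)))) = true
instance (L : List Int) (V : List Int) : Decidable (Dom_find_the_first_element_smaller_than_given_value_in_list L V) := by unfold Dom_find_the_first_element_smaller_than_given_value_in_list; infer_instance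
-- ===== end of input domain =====

-- B replaces A's scan-of-L-per-query by: first-occurrence dict, sorted distinct values,
-- binary search per query, (dif, index)-lexicographic choice between the two neighbours.

-- ===== PORT A =====
def find_the_first_element_smaller_than_given_value_in_list (L : List Int) (V : List Int) : List Int :=
  V.foldl (fun res v =>
    let st := (PySem.List.pyRange 0 (L.length : Int) 1).foldl
      (fun (st : Int × Int) idx =>
        if |v - PySem.List.pyGetD L idx 0| < st.1 then (|v - PySem.List.pyGetD L idx 0|, idx) else st)
      ((10:Int)^6, -1)
    res ++ [st.2]) []

-- ===== PORT B =====
-- 'first = {}; for i, x in enumerate(L): if x not in first: first[x] = i'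
def pvBuildFirst (L : List Int) : PySem.Dict Int Int :=
  (PySem.List.enumerate L 0).foldl
    (fun d p => if d.contains p.2 then d else d.insert p.2 p.1) PySem.Dict.empty

-- 'best = None; for j in (lo-1, lo): if 0 <= j < n: … if best is None or c < best: best = c'
def pvBestOf (v : Int) (vals : List Int) (first : PySem.Dict Int Int) (lo : Int) : Option (Int × Int) :=
  [lo - 1, lo].foldl (fun best j =>
    if 0 ≤ j ∧ j < (vals.length : Int) then
      let x := PySem.List.pyGetD vals j 0
      let d := if v ≥ x then v - x else x - v
      let c : Int × Int := (d, first.getD x 0)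
      match best with
      | none => some c
      | some b => if c.1 < b.1 ∨ (c.1 = b.1 ∧ c.2 < b.2) then some c else some b
    else best) none

-- body of the 'for v in V' loop; the 'while lo < hi' halving loop is exactly
-- PySem.List.bisectLeft (leftmost position with vals[pos] ≥ v); 'none' is
-- unreachable when n ≠ 0 (Python: best[1])
def pvNearestB (v : Int) (vals : List Int) (first : PySem.Dict Int Int) (n : Nat) : Int :=
  if n = 0 then -1
  else match pvBestOf v vals first ((PySem.List.bisectLeft vals v : Nat) : Int) with
       | some b => b.2
       | none => -1

def find_the_first_element_smaller_than_given_value_in_list_alt (L : List Int) (V : List Int) : List Int :=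
  let first := pvBuildFirst L
  let vals := PySem.List.sorted first.keys (fun x => x) false
  let n := vals.length
  V.foldl (fun res v => res ++ [pvNearestB v vals first n]) []

-- ===== PRECONDITION & SPEC =====
-- A's sentinel 10**6 is too small: on a nonempty L, for any query v whose distance to EVERY element of L
-- is ≥ 10**6, A returns -1 at that position instead of the index of the nearest element; B returns the
-- nearest element's (first) index, which is the intended value.
def D_find_the_first_element_smaller_than_given_value_in_list (L : List Int) (V : List Int) : Prop :=
  L ≠ [] ∧ ∃ v ∈ V, ∀ x ∈ L, (1000000:Int) ≤ |v - x|
instance (L : List Int) (V : List Int) : Decidable (D_find_the_first_element_smaller_than_given_value_in_list L V) := by unfold D_find_the_first_element_smaller_than_given_value_in_list; infer_instance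

def Spec_find_the_first_element_smaller_than_given_value_in_list (L : List Int) (V : List Int) (out : List Int) : Prop := ¬ D_find_the_first_element_smaller_than_given_value_in_list L V → out = find_the_first_element_smaller_than_given_value_in_list_alt L V
instance (L : List Int) (V : List Int) (out : List Int) : Decidable (Spec_find_the_first_element_smaller_than_given_value_in_list L V out) := by unfold Spec_find_the_first_element_smaller_than_given_value_in_list; infer_instance

def pvDiffWitness_find_the_first_element_smaller_than_given_value_in_list : List Int × List Int := ([0], [2000000])
def pvDiffWitnessOut_find_the_first_element_smaller_than_given_value_in_list : (List Int) × (List Int) := ([-1], [0])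

-- ===== CLAIM (what is proved, stated in full; the proofs are below) =====
def Claim_unchanged_find_the_first_element_smaller_than_given_value_in_list : Prop := ∀ (L : List Int) (V : List Int), Dom_find_the_first_element_smaller_than_given_value_in_list L V → Spec_find_the_first_element_smaller_than_given_value_in_list L V (find_the_first_element_smaller_than_given_value_in_list L V)
def Claim_changed_find_the_first_element_smaller_than_given_value_in_list : Prop := Dom_find_the_first_element_smaller_than_given_value_in_list (pvDiffWitness_find_the_first_element_smaller_than_given_value_in_list.1) (pvDiffWitness_find_the_first_element_smaller_than_given_value_in_list.2) ∧ D_find_the_first_element_smaller_than_given_value_in_list (pvDiffWitness_find_the_first_element_smaller_than_given_value_in_list.1) (pvDiffWitness_find_the_first_element_smaller_than_given_value_in_list.2) ∧ find_the_first_element_smaller_than_given_value_in_list (pvDiffWitness_find_the_first_element_smaller_than_given_value_in_list.1) (pvDiffWitness_find_the_first_element_smaller_than_given_value_in_list.2) = pvDiffWitnessOut_find_the_first_element_smaller_than_given_value_in_list.1 ∧ find_the_first_element_smaller_than_given_value_in_list_alt (pvDiffWitness_find_the_first_element_smaller_than_given_value_in_list.1) (pvDiffWitness_find_the_first_element_smaller_than_given_value_in_list.2)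 = pvDiffWitnessOut_find_the_first_element_smaller_than_given_value_in_list.2 ∧ pvDiffWitnessOut_find_the_first_element_smaller_than_given_value_in_list.1 ≠ pvDiffWitnessOut_find_the_first_element_smaller_than_given_value_in_list.2
def Claim_exact_find_the_first_element_smaller_than_given_value_in_list : Prop := ∀ (L : List Int) (V : List Int), Dom_find_the_first_element_smaller_than_given_value_in_list L V → D_find_the_first_element_smaller_than_given_value_in_list L V → find_the_first_element_smaller_than_given_value_in_list L V ≠ find_the_first_element_smaller_than_given_value_in_list_alt L V

-- ===== LEMMAS AND PROOFS =====

-- ---- lexicographic order on (dif, index) pairs ----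
def pvLexLe (p q : Int × Int) : Prop := p.1 < q.1 ∨ (p.1 = q.1 ∧ p.2 ≤ q.2)

theorem pvLexLe_trans {p q r : Int × Int} (h1 : pvLexLe p q) (h2 : pvLexLe q r) : pvLexLe p r := by
  unfold pvLexLe at *; omega

theorem pvLexLe_antisymm {p q : Int × Int} (h1 : pvLexLe p q) (h2 : pvLexLe q p) : p = q := by
  unfold pvLexLe at *
  have : p.1 = q.1 ∧ p.2 = q.2 := by omega
  exact Prod.ext this.1 this.2

theorem pvLexLe_fst {p q : Int × Int} (h : pvLexLe p q) : p.1 ≤ q.1 := by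
  unfold pvLexLe at h; omega

-- ---- A's inner loop as a fold over enumerate, and its minimality ----
def pvStepA (v : Int) (st : Int × Int) (p : Int × Int) : Int × Int :=
  if |v - p.2| < st.1 then (|v - p.2|, p.1) else st

def pvCands (v : Int) (L : List Int) : List (Int × Int) :=
  (PySem.List.enumerate L 0).map (fun p => (|v - p.2|, p.1))

theorem pvFoldA_min (v : Int) : ∀ (ps : List (Int × Int)) (seed : Int × Int),
    List.Pairwise (fun p q => p.1 < q.1) ps → (∀ p ∈ ps, seed.2 < p.1) →
    (ps.foldl (pvStepA v) seed = seed ∨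
      ps.foldl (pvStepA v) seed ∈ ps.map (fun p => (|v - p.2|, p.1))) ∧
    pvLexLe (ps.foldl (pvStepA v) seed) seed ∧
    ∀ q ∈ ps.map (fun p => (|v - p.2|, p.1)), pvLexLe (ps.foldl (pvStepA v) seed) q := by
  intro ps
  induction ps with
  | nil =>
    intro seed _ _
    refine ⟨Or.inl rfl, Or.inr ⟨rfl, le_refl _⟩, by simp⟩
  | cons p rest ih =>
    intro seed hpw hseed
    have hpwrest := hpw.tail
    have hplt : ∀ q ∈ rest, p.1 < q.1 := fun q hq => (List.pairwise_cons.mp hpw).1 q hq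
    simp only [List.foldl_cons, List.map_cons]
    set seed' := pvStepA v seed p with hseed'
    have hseed'cases : seed' = (|v - p.2|, p.1) ∨ seed' = seed := by
      unfold pvStepA at hseed'; split_ifs at hseed' <;> [exact Or.inl hseed'; exact Or.inr hseed']
    have hseed'rest : ∀ q ∈ rest, seed'.2 < q.1 := by
      intro q hq
      rcases hseed'cases with h | h
      · rw [h]; exact hplt q hq
      · rw [h]; exact hseed q (List.mem_cons_of_mem _ hq)
    obtain ⟨hmem, hle, hmin⟩ := ih seed' hpwrest hseed'rest
    have hles : pvLexLe seed' seed := by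
      unfold pvStepA at hseed'
      split_ifs at hseed' with hc
      · rw [hseed']; exact Or.inl hc
      · rw [hseed']; exact Or.inr ⟨rfl, le_refl _⟩
    have hlep : pvLexLe seed' (|v - p.2|, p.1) := by
      unfold pvStepA at hseed'
      split_ifs at hseed' with hc
      · rw [hseed']; exact Or.inr ⟨rfl, le_refl _⟩
      · rw [hseed']
        have hp1 := hseed p (List.mem_cons_self ..)
        unfold pvLexLe
        simp only []
        omega
    refine ⟨?_, pvLexLe_trans hle hles, ?_⟩
    · rcases hmem with h | h
      · rcases hseed'cases with h2 | h2
        · exact Or.inr (by rw [h, h2]; exact List.mem_cons_self ..)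
        · exact Or.inl (by rw [h, h2])
      · exact Or.inr (List.mem_cons_of_mem _ h)
    · intro q hq
      rcases List.mem_cons.mp hq with h | h
      · rw [h]; exact pvLexLe_trans hle hlep
      · exact hmin q h

-- if every element is far, A's loop never updates
theorem pvFoldA_far (v : Int) : ∀ (ps : List (Int × Int)) (seed : Int × Int),
    (∀ p ∈ ps, seed.1 ≤ |v - p.2|) → ps.foldl (pvStepA v) seed = seed := by
  intro ps
  induction ps with
  | nil => intro seed _; rfl
  | cons p rest ih =>
    intro seed hfar
    simp only [List.foldl_cons]
    have : pvStepA v seed p = seed := by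
      unfold pvStepA
      rw [if_neg (not_lt.mpr (hfar p (List.mem_cons_self ..)))]
    rw [this]
    exact ih seed (fun q hq => hfar q (List.mem_cons_of_mem _ hq))

-- ---- first-occurrence index ----
def pvFirstIdx (a : Int) : List Int → Int
  | [] => 0
  | x :: xs => if a = x then 0 else 1 + pvFirstIdx a xs

theorem pvFirstIdx_cons (a x : Int) (xs : List Int) :
    pvFirstIdx a (x :: xs) = if a = x then 0 else 1 + pvFirstIdx a xs := rfl

theorem pvFirstIdx_mem_enumerate (a : Int) (l : List Int) (s : Int) (h : a ∈ l) :
    (s + pvFirstIdx a l, a) ∈ PySem.List.enumerate l s := by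
  induction l generalizing s with
  | nil => simp at h
  | cons x xs ih =>
    show _ ∈ (s, x) :: PySem.List.enumerate xs (s + 1)
    rw [pvFirstIdx_cons]
    by_cases hax : a = x
    · subst hax; rw [if_pos rfl]; simp
    · rw [if_neg hax]
      rcases List.mem_cons.mp h with h' | h'
      · exact absurd h' hax
      · have := ih (s + 1) h'
        have harr : s + (1 + pvFirstIdx a xs) = s + 1 + pvFirstIdx a xs := by ring
        rw [harr]
        exact List.mem_cons_of_mem _ this

theorem pvFirstIdx_min (a : Int) (l : List Int) (s : Int) :
    ∀ p ∈ PySem.List.enumerate l s, p.2 = a → s + pvFirstIdx a l ≤ p.1 := by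
  induction l generalizing s with
  | nil => simp [PySem.List.enumerate]
  | cons x xs ih =>
    intro p hp hpa
    have hp' : p ∈ (s, x) :: PySem.List.enumerate xs (s + 1) := hp
    rw [pvFirstIdx_cons]
    rcases List.mem_cons.mp hp' with h | h
    · subst h
      simp only at hpa
      rw [if_pos hpa.symm]
      simp
    · have hge : s + 1 ≤ p.1 := by
        obtain ⟨k, hk, rfl⟩ := (PySem.List.mem_enumerate_iff _ _ _).mp h
        simp
      split_ifs with hax
      · omega
      · have := ih (s + 1) p h hpa; omega

-- ---- the first-occurrence dict ----
theorem pvBuildAux_get? : ∀ (l : List Int) (s : Int) (d : PySem.Dict Int Int) (x : Int),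
    ((PySem.List.enumerate l s).foldl
        (fun d p => if d.contains p.2 then d else d.insert p.2 p.1) d).get? x
      = if d.contains x then d.get? x
        else if x ∈ l then some (s + pvFirstIdx x l) else none := by
  intro l
  induction l with
  | nil =>
    intro s d x
    show d.get? x = _
    by_cases h : d.contains x = true
    · rw [if_pos h]
    · rw [if_neg h, if_neg (by simp)]
      rw [PySem.Dict.contains_eq_isSome_get?] at h
      cases hh : d.get? x with
      | none => rfl
      | some w => rw [hh] at h; simp at h
  | cons y ys ih =>
    intro s d x
    show ((PySem.List.enumerate ys (s+1)).foldl _ (if d.contains y then d else d.insert y s)).get? x = _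
    rw [ih (s+1)]
    by_cases hdy : d.contains y = true
    · rw [if_pos hdy]
      by_cases hdx : d.contains x = true
      · rw [if_pos hdx, if_pos hdx]
      · rw [if_neg hdx, if_neg hdx]
        by_cases hxy : x = y
        · subst hxy; rw [hdy] at hdx; exact absurd rfl hdx
        · rw [pvFirstIdx_cons, if_neg hxy]
          simp only [List.mem_cons]
          by_cases hxys : x ∈ ys
          · rw [if_pos hxys, if_pos (Or.inr hxys)]
            congr 1; ring
          · rw [if_neg hxys, if_neg (by tauto)]
    · rw [if_neg hdy]
      have hc : (d.insert y s).contains x = if x = y then true else d.contains x := by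
        rw [PySem.Dict.contains_eq_isSome_get?, PySem.Dict.get?_insert]
        split_ifs with h
        · simp
        · rw [PySem.Dict.contains_eq_isSome_get?]
      by_cases hxy : x = y
      · subst hxy
        rw [hc, if_pos rfl, if_pos rfl, PySem.Dict.get?_insert, if_pos rfl,
            if_neg hdy, if_pos (List.mem_cons_self ..)]
        rw [pvFirstIdx_cons, if_pos rfl]; norm_num
      · rw [hc, if_neg hxy]
        by_cases hdx : d.contains x = true
        · rw [if_pos hdx, if_pos hdx, PySem.Dict.get?_insert, if_neg hxy]
        · rw [if_neg hdx, if_neg hdx, pvFirstIdx_cons]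
          simp only [List.mem_cons]
          rw [if_neg hxy]
          by_cases hxys : x ∈ ys
          · rw [if_pos hxys, if_pos (Or.inr hxys)]
            congr 1; ring
          · rw [if_neg hxys, if_neg (by tauto)]

theorem pvBuildFirst_get? (L : List Int) (x : Int) :
    (pvBuildFirst L).get? x = if x ∈ L then some (pvFirstIdx x L) else none := by
  unfold pvBuildFirst
  rw [pvBuildAux_get? L 0 PySem.Dict.empty x, if_neg (by rw [PySem.Dict.contains_empty]; simp)]
  simp

theorem pvBuildFirst_getD (L : List Int) (x : Int) (h : x ∈ L) :
    (pvBuildFirst L).getD x 0 = pvFirstIdx x L := by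
  rw [PySem.Dict.getD_eq_get?_getD, pvBuildFirst_get?, if_pos h]; rfl

theorem pvBuildFirst_mem_keys (L : List Int) (x : Int) :
    x ∈ (pvBuildFirst L).keys ↔ x ∈ L := by
  constructor
  · intro h
    by_contra hx
    have := (PySem.Dict.get?_eq_none_iff_not_mem_keys (pvBuildFirst L) x).mp
      (by rw [pvBuildFirst_get?, if_neg hx])
    exact this h
  · intro h
    by_contra hk
    have := (PySem.Dict.get?_eq_none_iff_not_mem_keys (pvBuildFirst L) x).mpr hk
    rw [pvBuildFirst_get?, if_pos h] at this
    simp at this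

theorem pvBuildFirst_keys_nodup (L : List Int) : (pvBuildFirst L).keys.Nodup := by
  unfold pvBuildFirst
  generalize PySem.List.enumerate L 0 = ps
  have : ∀ (ps : List (Int × Int)) (d : PySem.Dict Int Int), d.keys.Nodup →
      (ps.foldl (fun d p => if d.contains p.2 then d else d.insert p.2 p.1) d).keys.Nodup := by
    intro ps
    induction ps with
    | nil => intro d hd; exact hd
    | cons p rest ih =>
      intro d hd
      simp only [List.foldl_cons]
      apply ih
      split_ifs with h
      · exact hd
      · exact PySem.Dict.nodup_keys_insert d p.2 p.1 hd
  exact this ps PySem.Dict.empty PySem.Dict.nodup_keys_empty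

-- ---- the sorted distinct values ----
def pvVals (L : List Int) : List Int :=
  PySem.List.sorted (pvBuildFirst L).keys (fun x => x) false

theorem pvVals_mem (L : List Int) (x : Int) : x ∈ pvVals L ↔ x ∈ L := by
  unfold pvVals
  rw [PySem.List.mem_sorted]
  exact pvBuildFirst_mem_keys L x

theorem pvVals_pairwise_lt (L : List Int) : (pvVals L).Pairwise (· < ·) := by
  have hle : (pvVals L).Pairwise (· ≤ ·) :=
    PySem.List.sorted_pairwise (pvBuildFirst L).keys (fun x => x)
  have hnd : (pvVals L).Nodup :=
    (PySem.List.sorted_perm (pvBuildFirst L).keys (fun x => x) false).symm.nodup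
      (pvBuildFirst_keys_nodup L)
  exact (hle.and hnd).imp (fun h => lt_of_le_of_ne h.1 h.2)

-- ---- the two-candidate loop ----
def pvCnd (v : Int) (vals : List Int) (first : PySem.Dict Int Int) (j : Int) : Int × Int :=
  (|v - PySem.List.pyGetD vals j 0|, first.getD (PySem.List.pyGetD vals j 0) 0)

theorem pvAbsDist (v x : Int) : (if v ≥ x then v - x else x - v) = |v - x| := by
  by_cases h : x ≤ v
  · rw [if_pos h, abs_of_nonneg (by omega)]
  · rw [if_neg (by omega), abs_of_neg (by omega)]; ring

def pvStepB (v : Int) (vals : List Int) (first : PySem.Dict Int Int)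
    (best : Option (Int × Int)) (j : Int) : Option (Int × Int) :=
  if 0 ≤ j ∧ j < (vals.length : Int) then
    let x := PySem.List.pyGetD vals j 0
    let d := if v ≥ x then v - x else x - v
    let c : Int × Int := (d, first.getD x 0)
    match best with
    | none => some c
    | some b => if c.1 < b.1 ∨ (c.1 = b.1 ∧ c.2 < b.2) then some c else some b
  else best

theorem pvBestOf_eq (v : Int) (vals : List Int) (first : PySem.Dict Int Int) (lo : Int) :
    pvBestOf v vals first lo = pvStepB v vals first (pvStepB v vals first none (lo - 1)) lo := rfl

theorem pvStepB_out (v : Int) (vals : List Int) (first : PySem.Dict Int Int)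
    (best : Option (Int × Int)) (j : Int) (h : ¬(0 ≤ j ∧ j < (vals.length : Int))) :
    pvStepB v vals first best j = best := by
  unfold pvStepB; rw [if_neg h]

theorem pvStepB_none (v : Int) (vals : List Int) (first : PySem.Dict Int Int)
    (j : Int) (h : 0 ≤ j ∧ j < (vals.length : Int)) :
    pvStepB v vals first none j = some (pvCnd v vals first j) := by
  unfold pvStepB pvCnd; rw [if_pos h]; simp only [pvAbsDist]

theorem pvStepB_some (v : Int) (vals : List Int) (first : PySem.Dict Int Int)
    (b : Int × Int) (j : Int) (h : 0 ≤ j ∧ j < (vals.length : Int)) :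
    pvStepB v vals first (some b) j =
      if (pvCnd v vals first j).1 < b.1 ∨
          ((pvCnd v vals first j).1 = b.1 ∧ (pvCnd v vals first j).2 < b.2)
      then some (pvCnd v vals first j) else some b := by
  unfold pvStepB pvCnd; rw [if_pos h]; simp only [pvAbsDist]

theorem pvBestOf_spec (v : Int) (vals : List Int) (first : PySem.Dict Int Int) (lo : Int)
    (hn : 0 < vals.length) (h0 : 0 ≤ lo) (h1 : lo ≤ (vals.length : Int)) :
    ∃ b, pvBestOf v vals first lo = some b ∧
      ((1 ≤ lo ∧ b = pvCnd v vals first (lo - 1)) ∨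
        (lo < (vals.length : Int) ∧ b = pvCnd v vals first lo)) ∧
      (1 ≤ lo → pvLexLe b (pvCnd v vals first (lo - 1))) ∧
      (lo < (vals.length : Int) → pvLexLe b (pvCnd v vals first lo)) := by
  rw [pvBestOf_eq]
  by_cases hr1 : 0 ≤ lo - 1 ∧ lo - 1 < (vals.length : Int)
  · rw [pvStepB_none v vals first _ hr1]
    by_cases hr2 : 0 ≤ lo ∧ lo < (vals.length : Int)
    · rw [pvStepB_some v vals first _ _ hr2]
      set c1 := pvCnd v vals first (lo - 1)
      set c2 := pvCnd v vals first lo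
      by_cases hc : c2.1 < c1.1 ∨ (c2.1 = c1.1 ∧ c2.2 < c1.2)
      · rw [if_pos hc]
        refine ⟨c2, rfl, Or.inr ⟨hr2.2, rfl⟩, fun _ => ?_, fun _ => Or.inr ⟨rfl, le_refl _⟩⟩
        unfold pvLexLe; omega
      · rw [if_neg hc]
        refine ⟨c1, rfl, Or.inl ⟨by omega, rfl⟩, fun _ => Or.inr ⟨rfl, le_refl _⟩, fun _ => ?_⟩
        unfold pvLexLe; omega
    · rw [pvStepB_out v vals first _ _ hr2]
      refine ⟨pvCnd v vals first (lo - 1), rfl, Or.inl ⟨by omega, rfl⟩,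
        fun _ => Or.inr ⟨rfl, le_refl _⟩, fun h => absurd ⟨h0, h⟩ hr2⟩
  · rw [pvStepB_out v vals first _ _ hr1]
    have hr2 : 0 ≤ lo ∧ lo < (vals.length : Int) := ⟨h0, by omega⟩
    rw [pvStepB_none v vals first _ hr2]
    refine ⟨pvCnd v vals first lo, rfl, Or.inr ⟨hr2.2, rfl⟩,
      fun h => absurd h (by omega), fun _ => Or.inr ⟨rfl, le_refl _⟩⟩

-- ---- per-query values of the two ports ----
def pvFA (L : List Int) (v : Int) : Int :=
  ((PySem.List.pyRange 0 (L.length : Int) 1).foldl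
    (fun (st : Int × Int) idx =>
      if |v - PySem.List.pyGetD L idx 0| < st.1 then (|v - PySem.List.pyGetD L idx 0|, idx) else st)
    ((10:Int)^6, -1)).2

def pvFB (L : List Int) (v : Int) : Int :=
  pvNearestB v (pvVals L) (pvBuildFirst L) (pvVals L).length

theorem pvPortA_eq_map (L V : List Int) :
    find_the_first_element_smaller_than_given_value_in_list L V = V.map (pvFA L) := by
  show V.foldl (fun res v => res ++ [pvFA L v]) [] = V.map (pvFA L)
  rw [PySem.List.foldl_append_singleton_eq_map (pvFA L) V []]
  simp

theorem pvPortB_eq_map (L V : List Int) :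
    find_the_first_element_smaller_than_given_value_in_list_alt L V = V.map (pvFB L) := by
  show V.foldl (fun res v => res ++ [pvFB L v]) [] = V.map (pvFB L)
  rw [PySem.List.foldl_append_singleton_eq_map (pvFB L) V []]
  simp

theorem pvFA_eq_enum (L : List Int) (v : Int) :
    pvFA L v = ((PySem.List.enumerate L 0).foldl (pvStepA v) ((1000000 : Int), -1)).2 := by
  unfold pvFA
  rw [show PySem.List.enumerate L 0 = PySem.List.enumerate L from rfl,
      PySem.List.enumerate_eq_map_pyRange L 0, List.foldl_map]
  norm_num
  rfl

-- ---- characterisation of candidates ----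
theorem pvCnd_eq (L : List Int) (v : Int) (j : Int) (h0 : 0 ≤ j)
    (hj : j < ((pvVals L).length : Int)) :
    pvCnd v (pvVals L) (pvBuildFirst L) j
      = (|v - (pvVals L)[j.toNat]'(by omega)|, pvFirstIdx ((pvVals L)[j.toNat]'(by omega)) L) := by
  unfold pvCnd
  rw [PySem.List.pyGetD_eq_getElem (pvVals L) 0 h0 hj]
  rw [pvBuildFirst_getD _ _ ((pvVals_mem L _).mp (List.getElem_mem _))]

theorem pvCnd_mem_cands (L : List Int) (v : Int) (j : Int) (h0 : 0 ≤ j)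
    (hj : j < ((pvVals L).length : Int)) :
    pvCnd v (pvVals L) (pvBuildFirst L) j ∈ pvCands v L := by
  rw [pvCnd_eq L v j h0 hj]
  unfold pvCands
  have hyL : (pvVals L)[j.toNat]'(by omega) ∈ L := (pvVals_mem L _).mp (List.getElem_mem _)
  have hmem := pvFirstIdx_mem_enumerate ((pvVals L)[j.toNat]'(by omega)) L 0 hyL
  rw [zero_add] at hmem
  exact List.mem_map.mpr ⟨_, hmem, rfl⟩

-- B's per-query value is the (dif, index)-lexicographic minimum over ALL candidates
theorem pvFB_spec (L : List Int) (v : Int) (hL : L ≠ []) :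
    ∃ b, pvFB L v = b.2 ∧ b ∈ pvCands v L ∧ ∀ q ∈ pvCands v L, pvLexLe b q := by
  obtain ⟨x0, hx0L⟩ := List.exists_mem_of_ne_nil L hL
  have hmemv := pvVals_mem L
  have hlt := pvVals_pairwise_lt L
  have hle : (pvVals L).Pairwise (· ≤ ·) := hlt.imp le_of_lt
  have hvne : pvVals L ≠ [] := by
    intro h
    have := (hmemv x0).mpr hx0L
    rw [h] at this; simp at this
  have hnlen : 0 < (pvVals L).length := List.length_pos_of_ne_nil hvne
  set lo := PySem.List.bisectLeft (pvVals L) v with hlo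
  obtain ⟨hlo_le, hbefore, hafter⟩ := PySem.List.bisectLeft_spec (pvVals L) v hle
  obtain ⟨b, hbeq, hbcases, hbmin1, hbmin2⟩ :=
    pvBestOf_spec v (pvVals L) (pvBuildFirst L) (lo : Int) hnlen
      (Int.natCast_nonneg lo) (by exact_mod_cast hlo_le)
  have hmono : ∀ (i j : Nat) (hi : i < (pvVals L).length) (hj : j < (pvVals L).length),
      i < j → (pvVals L)[i] < (pvVals L)[j] := by
    intro i j hi hj hij
    exact List.pairwise_iff_getElem.mp hlt i j hi hj hij
  refine ⟨b, ?_, ?_, ?_⟩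
  · unfold pvFB pvNearestB
    rw [if_neg (by omega), ← hlo, hbeq]
  · rcases hbcases with ⟨h1, rfl⟩ | ⟨h1, rfl⟩
    · exact pvCnd_mem_cands L v _ (by omega) (by omega)
    · exact pvCnd_mem_cands L v _ (Int.natCast_nonneg lo) h1
  · intro q hq
    unfold pvCands at hq
    obtain ⟨p, hp, rfl⟩ := List.mem_map.mp hq
    obtain ⟨k, hk, rfl⟩ := (PySem.List.mem_enumerate_iff L 0 p).mp hp
    simp only [zero_add]
    have hxv : L[k] ∈ pvVals L := (hmemv L[k]).mpr (List.getElem_mem hk)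
    obtain ⟨pidx, hpidx, hpx⟩ := List.mem_iff_getElem.mp hxv
    have hfmin : pvFirstIdx L[k] L ≤ (k : Int) := by
      have := pvFirstIdx_min L[k] L 0 ((0 : Int) + k, L[k]) (by
        rw [PySem.List.mem_enumerate_iff]; exact ⟨k, hk, rfl⟩) rfl
      omega
    rcases lt_trichotomy (pidx + 1) lo with hcase | hcase | hcase
    · -- pidx < lo - 1 : strictly farther than the left neighbour
      have hl1n : lo - 1 < (pvVals L).length := by omega
      have hb1 := hbmin1 (by omega)
      rw [pvCnd_eq L v ((lo : Int) - 1) (by omega) (by omega)] at hb1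
      have ht : ((lo : Int) - 1).toNat = lo - 1 := by omega
      simp only [ht] at hb1
      have hv1 : (pvVals L)[lo - 1]'hl1n < v := hbefore (lo - 1) hl1n (by omega)
      have hvp : (pvVals L)[pidx] < (pvVals L)[lo - 1]'hl1n := hmono pidx (lo - 1) hpidx hl1n (by omega)
      have e1 : |v - (pvVals L)[lo - 1]'hl1n| = v - (pvVals L)[lo - 1]'hl1n :=
        abs_of_nonneg (by omega)
      have e2 : |v - L[k]| = v - (pvVals L)[pidx] := by
        rw [← hpx]; exact abs_of_nonneg (by omega)
      have hfst := pvLexLe_fst hb1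
      rw [e1] at hfst
      exact Or.inl (by rw [e2]; omega)
    · -- pidx = lo - 1 : the left neighbour itself
      have hb1 := hbmin1 (by omega)
      rw [pvCnd_eq L v ((lo : Int) - 1) (by omega) (by omega)] at hb1
      have ht : ((lo : Int) - 1).toNat = pidx := by omega
      simp only [ht] at hb1
      refine pvLexLe_trans hb1 ?_
      rw [hpx]
      exact Or.inr ⟨rfl, hfmin⟩
    · rcases Nat.lt_or_ge lo (pvVals L).length with hlon | hlon
      · have hb2 := hbmin2 (by exact_mod_cast hlon)
        rw [pvCnd_eq L v (lo : Int) (Int.natCast_nonneg lo) (by exact_mod_cast hlon)] at hb2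
        have ht : ((lo : Int)).toNat = lo := by omega
        simp only [ht] at hb2
        rcases Nat.eq_or_lt_of_le (by omega : lo ≤ pidx) with hcase2 | hcase2
        · -- pidx = lo : the right neighbour itself
          subst hcase2
          refine pvLexLe_trans hb2 ?_
          rw [hpx]
          exact Or.inr ⟨rfl, hfmin⟩
        · -- lo < pidx : strictly farther than the right neighbour
          have hv2 : v ≤ (pvVals L)[lo]'hlon := hafter lo hlon (le_refl lo)
          have hvp : (pvVals L)[lo]'hlon < (pvVals L)[pidx] := hmono lo pidx hlon hpidx hcase2
          have e1 : |v - (pvVals L)[lo]'hlon| = (pvVals L)[lo]'hlon - v := by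
            rw [abs_of_nonpos (by omega)]; ring
          have e2 : |v - L[k]| = (pvVals L)[pidx] - v := by
            rw [← hpx, abs_of_nonpos (by omega)]; ring
          have hfst := pvLexLe_fst hb2
          rw [e1] at hfst
          exact Or.inl (by rw [e2]; omega)
      · -- lo = length: impossible here since pidx ≥ lo
        omega

-- candidate indices are nonnegative
theorem pvCands_snd_nonneg (L : List Int) (v : Int) :
    ∀ q ∈ pvCands v L, 0 ≤ q.2 := by
  intro q hq
  unfold pvCands at hq
  obtain ⟨p, hp, rfl⟩ := List.mem_map.mp hq
  obtain ⟨k, hk, rfl⟩ := (PySem.List.mem_enumerate_iff L 0 p).mp hp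
  simp

-- ---- the main per-query agreement ----
theorem pvMain (L : List Int) (v : Int) (hL : L ≠ [])
    (hx : ∃ x ∈ L, |v - x| < 1000000) : pvFA L v = pvFB L v := by
  obtain ⟨x0, hx0L, hx0⟩ := hx
  obtain ⟨b, hfb, hbmem, hbmin⟩ := pvFB_spec L v hL
  have hApw := PySem.List.pairwise_lt_enumerate L 0
  have hAseed : ∀ p ∈ PySem.List.enumerate L 0, ((1000000 : Int), (-1 : Int)).2 < p.1 := by
    intro p hp
    obtain ⟨k, hk, rfl⟩ := (PySem.List.mem_enumerate_iff _ _ _).mp hp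
    simp
    omega
  obtain ⟨hAmem, hAle, hAmin⟩ :=
    pvFoldA_min v (PySem.List.enumerate L 0) (1000000, -1) hApw hAseed
  obtain ⟨k0, hk0, hk0x⟩ := List.mem_iff_getElem.mp hx0L
  have hq0 : ((|v - x0|), ((k0 : Nat) : Int)) ∈ pvCands v L := by
    unfold pvCands
    refine List.mem_map.mpr ⟨((0 : Int) + k0, L[k0]), ?_, by rw [hk0x]; simp⟩
    rw [PySem.List.mem_enumerate_iff]
    exact ⟨k0, hk0, rfl⟩
  have hbseed : pvLexLe b (1000000, -1) := by
    have h := pvLexLe_fst (hbmin _ hq0)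
    exact Or.inl (by simp at h ⊢; omega)
  have hmb : (PySem.List.enumerate L 0).foldl (pvStepA v) (1000000, -1) = b := by
    refine pvLexLe_antisymm ?_ ?_
    · exact hAmin b (by
        unfold pvCands at hbmem
        exact hbmem)
    · rcases hAmem with h | h
      · rw [h]; exact hbseed
      · exact hbmin _ h
  rw [pvFA_eq_enum, hmb, hfb]

theorem pvNil (v : Int) : pvFA [] v = pvFB [] v := rfl

-- ===== VERDICT (by name: the statement is the Claim_ definition above) =====
theorem find_the_first_element_smaller_than_given_value_in_list_spec : Claim_unchanged_find_the_first_element_smaller_than_given_value_in_list := by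
  intro L V _ hnD
  rw [pvPortA_eq_map, pvPortB_eq_map]
  apply List.map_congr_left
  intro v hv
  by_cases hL : L = []
  · subst hL; exact pvNil v
  · refine pvMain L v hL ?_
    by_contra hcon
    push_neg at hcon
    refine hnD ?_
    unfold D_find_the_first_element_smaller_than_given_value_in_list
    exact ⟨hL, v, hv, hcon⟩
theorem find_the_first_element_smaller_than_given_value_in_list_changed : Claim_changed_find_the_first_element_smaller_than_given_value_in_list := by
  unfold Claim_changed_find_the_first_element_smaller_than_given_value_in_list; decide
theorem find_the_first_element_smaller_than_given_value_in_list_tight : Claim_exact_find_the_first_element_smaller_than_given_value_in_list := by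
  intro L V _ hD
  obtain ⟨hL, v, hvV, hfar⟩ := hD
  rw [pvPortA_eq_map, pvPortB_eq_map]
  intro heq
  have hA : pvFA L v = -1 := by
    rw [pvFA_eq_enum, pvFoldA_far v _ _ ?far]
    case far =>
      intro p hp
      obtain ⟨k, hk, rfl⟩ := (PySem.List.mem_enumerate_iff _ _ _).mp hp
      exact hfar L[k] (List.getElem_mem hk)
  have hB : 0 ≤ pvFB L v := by
    obtain ⟨b, hfb, hbmem, _⟩ := pvFB_spec L v hL
    rw [hfb]
    exact pvCands_snd_nonneg L v b hbmem
  obtain ⟨t, ht, hvt⟩ := List.mem_iff_getElem.mp hvV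
  have h1 := congrArg (fun l => l[t]?) heq
  simp only [List.getElem?_map, List.getElem?_eq_getElem ht] at h1
  rw [hvt] at h1
  simp only [Option.map_some] at h1
  have h2 : pvFA L v = pvFB L v := Option.some.inj h1
  omega
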